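-- pv_equiv track=rewrite | github.com/RasmusKoRiis/nf-core-rsvseq | bin/rsv_subtype_guess.py | kmer_set
-- ===== SOURCE A (Python) =====
-- def kmer_set(seq: str, k: int):
--     out = set()
--     if len(seq) < k:
--         return out
--     for i in range(0, len(seq) - k + 1):
--         kmer = seq[i : i + k]
--         if "N" in kmer:
--             continue
--         out.add(kmer)
--     return out
-- ===== SOURCE B (Python) =====
-- def kmer_set(seq: str, k: int):
--     out = set()
--     n = len(seq)
--     if n < k:
--         return out
--     # nxt[i] = index of the first 'N' at position >= i, or n if there is none
--     nxt = [n]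
--     for i in reversed(range(n)):
--         nxt.append(i if seq[i] == "N" else nxt[-1])
--     nxt.reverse()
--     for i in range(n - k + 1):
--         if nxt[i] >= i + k:
--             out.add(seq[i : i + k])
--     return out
-- ===== Notes on version B (the rewrite author's own statement) =====
-- stated objective: alternative
-- what changed: B precomputes in a backward pass an array nxt[i] = position of the first 'N' at or after i, then accepts window i iff nxt[i] >= i+k, replacing A's per-window 'N in kmer' substring scan with an O(1) index comparison.
-- outside the precondition, e.g. on kmer_set('AGN', -1): A returns {'', 'AG'}, B raises IndexError
import Mathlib
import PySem

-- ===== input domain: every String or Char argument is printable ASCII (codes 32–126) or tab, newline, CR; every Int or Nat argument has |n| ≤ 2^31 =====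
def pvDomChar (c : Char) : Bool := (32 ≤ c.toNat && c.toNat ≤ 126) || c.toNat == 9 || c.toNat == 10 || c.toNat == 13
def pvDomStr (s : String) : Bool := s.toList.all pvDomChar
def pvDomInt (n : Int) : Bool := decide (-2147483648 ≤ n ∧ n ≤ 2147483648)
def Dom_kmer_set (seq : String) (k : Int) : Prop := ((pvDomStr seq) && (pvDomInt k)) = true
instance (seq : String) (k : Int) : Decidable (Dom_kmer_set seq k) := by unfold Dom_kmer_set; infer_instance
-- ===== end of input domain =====

-- B precomputes, in a backward pass, nxt[i] = position of the first 'N' at or after i (or n),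
-- and accepts window i iff nxt[i] >= i + k, replacing A's per-window "N in kmer" substring scan
-- by an index comparison (objective: alternative algorithm, same asymptotic cost).

-- ===== PORT A =====
def kmer_set (seq : String) (k : Int) : List String :=
  let out : PySem.Set String := PySem.Set.empty
  if PySem.Str.len seq < k then out
  else
    (PySem.List.pyRange 0 (PySem.Str.len seq - k + 1) 1).foldl
      (fun out i =>
        let kmer := PySem.Str.slice seq (some i) (some (i + k))
        if PySem.Str.isIn "N" kmer then out
        else PySem.Set.add out kmer)
      out

-- ===== PORT B =====
-- nxt[-1] and nxt[i] are always-in-range Python list indexings; pyGet? … |>.getD 0 is exact there.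
def kmer_set_alt (seq : String) (k : Int) : List String :=
  let out : PySem.Set String := PySem.Set.empty
  let n := PySem.Str.len seq
  if n < k then out
  else
    let nxt : List Int :=
      (((PySem.List.pyRange 0 n 1).reverse).foldl
        (fun acc i =>
          acc ++ [if PySem.Str.pyGet? seq i = some 'N' then i
                  else (PySem.List.pyGet? acc (-1)).getD 0])
        [n]).reverse
    (PySem.List.pyRange 0 (n - k + 1) 1).foldl
      (fun out i =>
        if (PySem.List.pyGet? nxt i).getD 0 ≥ i + k then
          PySem.Set.add out (PySem.Str.slice seq (some i) (some (i + k)))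
        else out)
      out

-- ===== PRECONDITION & SPEC =====
-- Pre_ excludes negative k (A still returns there): with k < 0 A's loop runs past the end of the
-- string and its windows are Python negative-stop slicing artefacts, while B's index i then
-- overruns its nxt array and raises IndexError.
def Pre_kmer_set (seq : String) (k : Int) : Prop := 0 ≤ k
instance (seq : String) (k : Int) : Decidable (Pre_kmer_set seq k) := by unfold Pre_kmer_set; infer_instance
def pvWitness_kmer_set : String × Int := ("AGA", 2)
def Spec_kmer_set (seq : String) (k : Int) (out : List String) : Prop := out = kmer_set_alt seq k
instance (seq : String) (k : Int) (out : List String) : Decidable (Spec_kmer_set seq k out) := by unfold Spec_kmer_set; infer_instance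

-- ===== CLAIM (what is proved, stated in full; the proofs are below) =====
def Claim_equal_kmer_set : Prop := ∀ (seq : String) (k : Int), Dom_kmer_set seq k → Pre_kmer_set seq k → Spec_kmer_set seq k (kmer_set seq k)

-- ===== LEMMAS AND PROOFS =====

-- position of the first 'N' in cs at index ≥ i, or cs.length if there is none
def pvNxt (cs : List Char) (i : Nat) : Nat := i + List.findIdx (· == 'N') (cs.drop i)

theorem pvNxt_len (cs : List Char) : pvNxt cs cs.length = cs.length := by
  simp [pvNxt, List.findIdx_nil]

theorem pvNxt_step (cs : List Char) (m : Nat) (hm : m < cs.length) :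
    pvNxt cs m = if cs[m] = 'N' then m else pvNxt cs (m + 1) := by
  unfold pvNxt
  rw [List.drop_eq_getElem_cons hm, List.findIdx_cons]
  by_cases h : cs[m] = 'N'
  · simp [h]
  · have hb : (cs[m] == 'N') = false := by simp [h]
    rw [hb, if_neg h]
    simp only [cond_false]
    omega

theorem pvMemTake (cs : List Char) : ∀ (t : Nat), t ≤ cs.length →
    ('N' ∈ cs.take t ↔ List.findIdx (· == 'N') cs < t) := by
  induction cs with
  | nil =>
    intro t ht
    have h0 : t = 0 := by simpa using ht
    subst h0; simp
  | cons c l ih =>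
    intro t ht
    cases t with
    | zero => simp
    | succ s =>
      rw [List.take_succ_cons, List.findIdx_cons]
      by_cases hc : c = 'N'
      · have hb : (c == 'N') = true := by simp [hc]
        rw [hb]
        simp [hc]
      · have hb : (c == 'N') = false := by simp [hc]
        rw [hb]
        simp only [cond_false, List.mem_cons]
        have ihs := ih s (by simpa using ht)
        constructor
        · rintro (h | h)
          · exact absurd h.symm hc
          · have := ihs.mp h; omega
        · intro h
          exact Or.inr (ihs.mpr (by omega))

-- key bridge: window i is N-free iff pvNxt i is at least i + k
theorem pvCond (cs : List Char) (j t : Nat) (h : j + t ≤ cs.length) :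
    ('N' ∈ (cs.drop j).take t ↔ pvNxt cs j < j + t) := by
  have hlen : t ≤ (cs.drop j).length := by simp; omega
  rw [pvMemTake (cs.drop j) t hlen]
  unfold pvNxt
  omega

theorem pvIsInN (w : List Char) : PySem.Chars.isIn ['N'] w = decide ('N' ∈ w) := by
  by_cases h : 'N' ∈ w
  · have ht : PySem.Chars.isIn ['N'] w = true := by
      rw [PySem.Chars.isIn_iff_infix]
      obtain ⟨s, t, hst⟩ := List.append_of_mem h
      exact ⟨s, t, by rw [hst]; simp⟩
    simp [ht, h]
  · have ht : ¬ (PySem.Chars.isIn ['N'] w = true) := by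
      rw [PySem.Chars.isIn_iff_infix]
      intro hinf; exact h (hinf.subset (by simp))
    simp [h]
    exact Bool.eq_false_iff.mpr ht

-- the backward building loop of B, on the list side
def pvG (cs : List Char) (acc : List Int) (j : Nat) : List Int :=
  acc ++ [if cs[j]? = some 'N' then (j : Int) else acc.getLast?.getD 0]

theorem pvBuild (cs : List Char) : ∀ (d m : Nat), m + d = cs.length →
    ((List.range' m d).reverse.foldl (pvG cs) [(cs.length : Int)])
      = (cs.length : Int) :: ((List.range' m d).reverse.map (fun i => (pvNxt cs i : Int))) := by
  intro d
  induction d with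
  | zero => intro m _; simp
  | succ e ih =>
    intro m hm
    have hm' : m < cs.length := by omega
    rw [List.range'_succ, List.reverse_cons, List.foldl_append, ih (m + 1) (by omega)]
    simp only [List.foldl_cons, List.foldl_nil, pvG]
    have hlast : ((cs.length : Int) ::
        ((List.range' (m + 1) e).reverse.map (fun i => (pvNxt cs i : Int)))).getLast?.getD 0
        = (pvNxt cs (m + 1) : Int) := by
      cases e with
      | zero =>
        have h1 : m + 1 = cs.length := by omega
        simp [h1, pvNxt_len]
      | succ e' =>
        rw [List.range'_succ, List.reverse_cons, List.map_append]
        simp only [List.map_cons, List.map_nil]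
        rw [← List.cons_append, List.getLast?_concat]
        rfl
    rw [hlast, List.getElem?_eq_getElem hm', List.map_append]
    have hval : (if some cs[m] = some 'N' then (m : Int) else (pvNxt cs (m + 1) : Int))
        = (pvNxt cs m : Int) := by
      rw [pvNxt_step cs m hm']
      by_cases hN : cs[m] = 'N' <;> simp [hN]
    rw [hval]
    simp

theorem pvNxtList (cs : List Char) :
    (((List.range cs.length).reverse.foldl (pvG cs) [(cs.length : Int)]).reverse)
      = (List.range (cs.length + 1)).map (fun i => (pvNxt cs i : Int)) := by
  rw [List.range_eq_range', pvBuild cs cs.length 0 (by omega)]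
  rw [List.reverse_cons, List.map_reverse, List.reverse_reverse]
  rw [List.range_succ, List.range_eq_range', List.map_append]
  simp [pvNxt_len]

-- ===== VERDICT (by name: the statement is the Claim_ definition above) =====
theorem kmer_set_spec : Claim_equal_kmer_set := by
  intro seq k _hdom hpre
  unfold Spec_kmer_set
  by_cases hlen : PySem.Str.len seq < k
  · unfold kmer_set kmer_set_alt
    rw [if_pos hlen, if_pos hlen]
  · have hk0 : (0 : Int) ≤ k := hpre
    have hkn : k ≤ (seq.toList.length : Int) := by
      rw [PySem.Str.len_eq] at hlen; exact_mod_cast not_lt.mp hlen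
    unfold kmer_set kmer_set_alt
    rw [if_neg hlen, if_neg hlen]
    rw [PySem.Str.len_eq]
    -- B's nxt list is the table of pvNxt values
    have hfun : (fun (acc : List Int) (j : Nat) =>
        acc ++ [if PySem.Str.pyGet? seq (0 + (j : Int)) = some 'N' then (0 + (j : Int))
                else (PySem.List.pyGet? acc (-1)).getD 0]) = pvG seq.toList := by
      funext acc j
      simp [pvG, PySem.List.pyGet?_neg_one]
    have hnxt : (((PySem.List.pyRange 0 ((seq.toList.length : Int)) 1).reverse).foldl
        (fun acc i =>
          acc ++ [if PySem.Str.pyGet? seq i = some 'N' then i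
                  else (PySem.List.pyGet? acc (-1)).getD 0]) [(seq.toList.length : Int)]).reverse
        = (List.range (seq.toList.length + 1)).map (fun i => (pvNxt seq.toList i : Int)) := by
      rw [PySem.List.pyRange_one, ← List.map_reverse, List.foldl_map, hfun]
      rw [show ((seq.toList.length : Int) - 0).toNat = seq.toList.length by omega]
      exact pvNxtList seq.toList
    rw [hnxt, PySem.List.pyRange_one 0 ((seq.toList.length : Int) - k + 1), List.foldl_map,
      List.foldl_map]
    apply PySem.List.foldl_congr_mem
    intro acc j hj
    have hjm : (j : Int) + k ≤ (seq.toList.length : Int) := by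
      have := List.mem_range.mp hj
      omega
    have hjk : j + k.toNat ≤ seq.toList.length := by omega
    -- the window at start j, as a list of chars
    have hbody : PySem.Str.slice seq (some (0 + (j : Int))) (some (0 + (j : Int) + k))
        = String.ofList ((seq.toList.drop j).take k.toNat) := by
      simp only [zero_add, PySem.Str.slice, PySem.Chars.slice]
      congr 1
      rw [show (j : Int) + k = (j : Int) + (k.toNat : Int) by omega]
      exact PySem.List.slice_natCast_add seq.toList j k.toNat
    have hcond : PySem.Str.isIn "N" (String.ofList ((seq.toList.drop j).take k.toNat))
        = decide ('N' ∈ (seq.toList.drop j).take k.toNat) := by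
      have hN : ("N" : String).toList = ['N'] := by decide
      simp [PySem.Str.isIn, hN, pvIsInN]
    -- B's table lookup at j
    have hget : PySem.List.pyGet?
        ((List.range (seq.toList.length + 1)).map (fun i => (pvNxt seq.toList i : Int))) (0 + (j : Int))
        = some (pvNxt seq.toList j : Int) := by
      rw [zero_add, PySem.List.pyGet?_natCast, List.getElem?_map, List.getElem?_range (by omega)]
      rfl
    simp only [hbody, hcond, hget, Option.getD_some]
    by_cases hN : 'N' ∈ (seq.toList.drop j).take k.toNat
    · have hlt : pvNxt seq.toList j < j + k.toNat := (pvCond seq.toList j k.toNat hjk).mp hN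
      rw [if_pos (by simpa using hN), if_neg (by omega)]
    · have hge : ¬ pvNxt seq.toList j < j + k.toNat :=
        fun h => hN ((pvCond seq.toList j k.toNat hjk).mpr h)
      rw [if_neg (by simpa using hN), if_pos (by omega)]
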